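-- pv_equiv track=rewrite | github.com/dawoodaijaz97/Leetcode | fruits-into-baskets-ii/solution.py | solve
-- ===== SOURCE A (Python) =====
-- def solve(fruits: list[int], baskets: list[int]) -> int:
--     """
--     Solves the problem of placing fruits into baskets according to given rules.
--
--     :param fruits: List of integers representing the quantity of each fruit type.
--     :param baskets: List of integers representing the capacity of each basket.
--     :return: The number of fruit types that remain unplaced after all possible allocations.
--     """
--     # Sort both lists to facilitate the placement process
--     fruits.sort()
--     baskets.sort()
--
--     fruit_index = 0
--     basket_index = 0
--
--     while fruit_index < len(fruits) and basket_index < len(baskets):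
--         if baskets[basket_index] >= fruits[fruit_index]:
--             # If the current basket can hold the current fruit, move to the next fruit
--             fruit_index += 1
--         else:
--             # Move to the next basket if it cannot hold the current fruit
--             basket_index += 1
--
--     # The number of unplaced fruits is the difference between total fruits and placed fruits
--     return len(fruits) - fruit_index
-- ===== SOURCE B (Python) =====
-- def solve(fruits: list[int], baskets: list[int]) -> int:
--     # Return-value equivalent to A; note A also sorts both lists in place, B does not mutate.
--     if not baskets:
--         return len(fruits)
--     cap = max(baskets)
--     return sum(1 for f in fruits if f > cap)
-- ===== Notes on version B (the rewrite author's own statement) =====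
-- stated objective: faster
-- what changed: A sorts both lists and walks a two-pointer loop in which a fitting basket is never consumed, so its result equals the number of fruits exceeding the largest basket; B computes that directly with one max() and one counting pass, no sorting (B does not mutate the argument lists; equivalence is about the return value).
import Mathlib
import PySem

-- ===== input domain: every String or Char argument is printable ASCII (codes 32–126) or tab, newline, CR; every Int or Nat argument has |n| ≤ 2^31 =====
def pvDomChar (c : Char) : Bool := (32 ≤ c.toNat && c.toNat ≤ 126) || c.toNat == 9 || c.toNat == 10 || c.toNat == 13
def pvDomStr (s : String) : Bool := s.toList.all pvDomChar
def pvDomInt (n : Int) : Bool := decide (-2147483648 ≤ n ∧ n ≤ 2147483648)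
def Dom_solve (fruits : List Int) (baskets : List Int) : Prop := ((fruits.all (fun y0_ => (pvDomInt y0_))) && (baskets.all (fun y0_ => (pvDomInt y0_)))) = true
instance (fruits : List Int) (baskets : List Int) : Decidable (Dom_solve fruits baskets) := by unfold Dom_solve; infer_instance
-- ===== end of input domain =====

-- B replaces A's sort + two-pointer walk (whose basket pointer is never advanced on a fit) by one
-- max() and one counting pass; equivalence is about the RETURN value only — A sorts both argument
-- lists in place, B does not mutate them.

-- ===== PORT A =====
-- the while loop of A, on the two sorted lists, as structural recursion on the two indices
def solveLoop (fruits baskets : List Int) (fi bi : Nat) : Nat :=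
  if h : fi < fruits.length ∧ bi < baskets.length then
    if baskets[bi]'h.2 ≥ fruits[fi]'h.1 then
      solveLoop fruits baskets (fi + 1) bi
    else
      solveLoop fruits baskets fi (bi + 1)
  else fi
termination_by (fruits.length - fi) + (baskets.length - bi)
decreasing_by all_goals omega

def solve (fruits : List Int) (baskets : List Int) : Int :=
  let fs := PySem.List.sorted fruits (fun x => x) false
  let bs := PySem.List.sorted baskets (fun x => x) false
  (fs.length : Int) - (solveLoop fs bs 0 0 : Int)

-- ===== PORT B =====
def solve_alt (fruits : List Int) (baskets : List Int) : Int :=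
  if baskets.isEmpty then (fruits.length : Int)
  else
    let cap := (PySem.List.max? baskets (fun x => x)).getD 0
    fruits.foldl (fun acc f => if f > cap then acc + 1 else acc) (0 : Int)

-- ===== PRECONDITION & SPEC =====
def Spec_solve (fruits : List Int) (baskets : List Int) (out : Int) : Prop := out = solve_alt fruits baskets
instance (fruits : List Int) (baskets : List Int) (out : Int) : Decidable (Spec_solve fruits baskets out) := by unfold Spec_solve; infer_instance

-- ===== CLAIM (what is proved, stated in full; the proofs are below) =====
def Claim_equal_solve : Prop := ∀ (fruits : List Int) (baskets : List Int), Dom_solve fruits baskets → Spec_solve fruits baskets (solve fruits baskets)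

-- ===== LEMMAS AND PROOFS =====

-- in a ≤-sorted list, earlier elements are ≤ later ones
lemma sorted_getElem_le {bs : List Int} (hbs : bs.Pairwise (· ≤ ·)) {i j : Nat}
    (hij : i ≤ j) (hj : j < bs.length) : bs[i]'(by omega) ≤ bs[j] := by
  rcases Nat.lt_or_eq_of_le hij with h | h
  · exact (List.pairwise_iff_getElem.mp hbs) i j (by omega) hj h
  · subst h; rfl

-- every element of a ≤-sorted nonempty list is ≤ its last element
lemma sorted_le_last {bs : List Int} (hbs : bs.Pairwise (· ≤ ·)) {x : Int} (hx : x ∈ bs)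
    (hne : 0 < bs.length) : x ≤ bs[bs.length - 1]'(by omega) := by
  rcases List.mem_iff_getElem.mp hx with ⟨i, hi, rfl⟩
  exact sorted_getElem_le hbs (by omega) (by omega)

-- characterisation of A's loop: with both lists sorted and M a maximum element of baskets,
-- the loop places exactly the remaining fruits that are ≤ M
lemma solveLoop_eq (fs bs : List Int) (M : Int)
    (hfs : fs.Pairwise (· ≤ ·)) (hbs : bs.Pairwise (· ≤ ·))
    (hMmem : M ∈ bs) (hMmax : ∀ y ∈ bs, y ≤ M) :
    ∀ fi bi : Nat, bi < bs.length →
      solveLoop fs bs fi bi = fi + (fs.drop fi).countP (fun f => decide (f ≤ M)) := by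
  intro fi bi
  induction fi, bi using solveLoop.induct fs bs with
  | case1 fi bi h hcond ih =>
    intro hbi
    rw [solveLoop, dif_pos h, if_pos hcond, ih hbi]
    have hdrop : fs.drop fi = fs[fi]'h.1 :: fs.drop (fi + 1) :=
      List.drop_eq_getElem_cons h.1
    have hle : fs[fi]'h.1 ≤ M :=
      le_trans hcond (hMmax _ (List.getElem_mem h.2))
    rw [hdrop, List.countP_cons]
    simp [hle]; omega
  | case2 fi bi h hcond ih =>
    intro hbi
    rw [solveLoop, dif_pos h, if_neg hcond]
    by_cases hbi1 : bi + 1 < bs.length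
    · exact ih hbi1
    · -- baskets exhausted: bs[bi] is the last (hence maximal) element, and it is < fs[fi]
      have hbieq : bi = bs.length - 1 := by omega
      have hMle : M ≤ bs[bi]'h.2 := by
        subst hbieq; exact sorted_le_last hbs hMmem (by omega)
      have hfgt : M < fs[fi]'h.1 := lt_of_le_of_lt hMle (not_le.mp hcond)
      rw [solveLoop, dif_neg (show ¬(fi < fs.length ∧ bi + 1 < bs.length) by omega)]
      have hcount : (fs.drop fi).countP (fun f => decide (f ≤ M)) = 0 := by
        rw [List.countP_eq_zero]
        intro f hf
        rcases List.mem_iff_getElem.mp hf with ⟨k, hk, rfl⟩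
        have hk' : k < fs.length - fi := by simpa using hk
        rw [List.getElem_drop]
        have hmono : fs[fi]'h.1 ≤ fs[fi + k]'(by omega) :=
          sorted_getElem_le hfs (by omega) (by omega)
        simp; omega
      omega
  | case3 fi bi h =>
    intro hbi
    rw [solveLoop, dif_neg h]
    have : fs.length ≤ fi := by omega
    rw [List.drop_eq_nil_of_le this]
    simp
-- B's counting fold is a countP
lemma foldl_count_gt (fruits : List Int) (cap : Int) :
    fruits.foldl (fun acc f => if f > cap then acc + 1 else acc) (0 : Int)
      = (fruits.countP (fun f => decide (cap < f)) : Int) := by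
  induction fruits using List.reverseRecOn with
  | nil => simp
  | append_singleton xs x ih =>
    rw [List.foldl_append, List.countP_append]
    simp only [List.foldl_cons, List.foldl_nil, List.countP_cons, List.countP_nil, ih]
    by_cases h : cap < x <;> simp [h, gt_iff_lt]

-- ===== VERDICT (by name: the statement is the Claim_ definition above) =====
theorem solve_spec : Claim_equal_solve := by
  intro fruits baskets _
  unfold Spec_solve solve solve_alt
  by_cases hb : baskets = []
  · subst hb
    have : PySem.List.sorted ([] : List Int) (fun x => x) false = [] := rfl
    simp [this, solveLoop, PySem.List.length_sorted]
  · simp only [List.isEmpty_iff, hb, if_false]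
    set fs := PySem.List.sorted fruits (fun x => x) false with hfs
    set bs := PySem.List.sorted baskets (fun x => x) false with hbs
    have hbsne : bs ≠ [] := by
      simpa [hbs, PySem.List.sorted_eq_nil_iff] using hb
    -- the max of baskets
    obtain ⟨cap, hcap⟩ : ∃ c, PySem.List.max? baskets (fun x => x) = some c := by
      rcases h : PySem.List.max? baskets (fun x => x) with _ | c
      · rw [PySem.List.max?_eq_none_iff] at h; exact absurd h hb
      · exact ⟨c, rfl⟩
    have hcapmem : cap ∈ baskets := PySem.List.max?_mem hcap
    have hcapmax : ∀ y ∈ baskets, y ≤ cap := PySem.List.max?_isMax hcap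
    have hperm : bs.Perm baskets := PySem.List.sorted_perm baskets (fun x => x) false
    have hfperm : fs.Perm fruits := PySem.List.sorted_perm fruits (fun x => x) false
    have hloop := solveLoop_eq fs bs cap
      (PySem.List.sorted_pairwise fruits (fun x => x))
      (PySem.List.sorted_pairwise baskets (fun x => x))
      ((hperm.mem_iff).mpr hcapmem)
      (fun y hy => hcapmax y (hperm.mem_iff.mp hy))
      0 0 (List.length_pos_of_ne_nil hbsne)
    have hcapD : (PySem.List.max? baskets (fun x => x)).getD 0 = cap := by rw [hcap]; rfl
    rw [hcapD]
    rw [hloop, foldl_count_gt fruits cap]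
    simp only [List.drop_zero, Nat.zero_add]
    have hsplit : fs.countP (fun f => decide (f ≤ cap)) + fs.countP (fun f => decide (cap < f))
        = fs.length := by
      have h1 := List.length_eq_countP_add_countP (p := fun f => decide (f ≤ cap)) (l := fs)
      have h2 : fs.countP (fun a => decide ¬(decide (a ≤ cap) = true)) = fs.countP (fun f => decide (cap < f)) :=
        List.countP_congr (by intro x _; simp)
      omega
    have hcnt : fs.countP (fun f => decide (cap < f)) = fruits.countP (fun f => decide (cap < f)) :=
      hfperm.countP_eq _
    rw [← hcnt]
    omega
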